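-- pv_equiv track=rewrite | github.com/cbcgb-com/sgbs-training | apps/observation/entities.py | _dedupe_overlapping
-- ===== SOURCE A (Python) =====
-- from typing import Literal
--
-- EntityType = Literal["who", "when", "where"]
--
-- def _dedupe_overlapping(
--     entities: list[tuple[int, int, int, EntityType, str]],
-- ) -> list[tuple[int, int, int, EntityType, str]]:
--     """Per verse, keep non-overlapping spans (first occurrence wins)."""
--     by_verse: dict[int, list[tuple[int, int, EntityType, str]]] = {}
--     for verse_n, start, end, etype, label in entities:
--         by_verse.setdefault(verse_n, []).append((start, end, etype, label))
--
--     result: list[tuple[int, int, int, EntityType, str]] = []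
--     for verse_n in sorted(by_verse.keys()):
--         spans = sorted(by_verse[verse_n], key=lambda x: x[0])
--         last_end = -1
--         for start, end, etype, label in spans:
--             if start >= last_end:
--                 result.append((verse_n, start, end, etype, label))
--                 last_end = end
--     return result
-- ===== SOURCE B (Python) =====
-- def _dedupe_overlapping(entities):
--     """Per verse, keep non-overlapping spans (first occurrence wins)."""
--     result = []
--     cur_verse = None
--     last_end = -1
--     for verse_n, start, end, etype, label in sorted(
--         entities, key=lambda x: (x[0], x[1])
--     ):
--         if verse_n != cur_verse:
--             cur_verse = verse_n
--             last_end = -1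
--         if start >= last_end:
--             result.append((verse_n, start, end, etype, label))
--             last_end = end
--     return result
-- ===== Notes on version B (the rewrite author's own statement) =====
-- stated objective: simpler
-- what changed: Replaces the by-verse dict grouping plus nested sorted-keys/sorted-spans loops with one global stable sort by (verse, start) and a single flat greedy pass that resets last_end when the verse changes.
import Mathlib
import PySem

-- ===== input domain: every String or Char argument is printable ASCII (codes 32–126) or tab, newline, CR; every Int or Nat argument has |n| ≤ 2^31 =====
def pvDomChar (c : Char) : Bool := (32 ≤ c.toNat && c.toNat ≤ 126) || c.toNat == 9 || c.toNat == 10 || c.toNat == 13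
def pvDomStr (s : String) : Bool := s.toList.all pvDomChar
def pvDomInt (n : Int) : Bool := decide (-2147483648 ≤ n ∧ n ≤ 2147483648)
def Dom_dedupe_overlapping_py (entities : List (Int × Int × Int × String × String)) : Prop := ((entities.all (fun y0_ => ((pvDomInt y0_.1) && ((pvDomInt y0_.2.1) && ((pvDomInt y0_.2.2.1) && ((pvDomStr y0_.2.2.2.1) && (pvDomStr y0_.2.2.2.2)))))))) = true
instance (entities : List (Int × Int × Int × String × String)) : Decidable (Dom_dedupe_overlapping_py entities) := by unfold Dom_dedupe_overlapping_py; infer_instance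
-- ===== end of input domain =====

-- B replaces A's by-verse dict grouping and nested loops with one global stable
-- sort by (verse, start) and a single flat greedy pass (objective: simpler).

-- ===== PORT A =====
def dedupe_overlapping_py (entities : List (Int × Int × Int × String × String)) : List (Int × Int × Int × String × String) :=
  -- by_verse.setdefault(verse_n, []).append((start, end, etype, label))
  let by_verse : PySem.Dict Int (List (Int × Int × String × String)) :=
    entities.foldl (fun d p => d.modify p.1 [] (· ++ [p.2])) PySem.Dict.empty
  -- for verse_n in sorted(by_verse.keys()): …
  (PySem.List.sorted by_verse.keys (fun k => k) false).foldl
    (fun result verse_n =>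
      let spans := PySem.List.sorted (by_verse.getD verse_n []) (fun x => x.1) false
      (spans.foldl
        (fun acc y =>
          if acc.2 ≤ y.1 then
            (acc.1 ++ [(verse_n, y.1, y.2.1, y.2.2.1, y.2.2.2)], y.2.1)
          else acc)
        (result, (-1 : Int))).1)
    []

-- ===== PORT B =====
def dedupe_overlapping_py_alt (entities : List (Int × Int × Int × String × String)) : List (Int × Int × Int × String × String) :=
  ((PySem.List.sorted2 entities (fun x => x.1) (fun x => x.2.1) false).foldl
    (fun (st : List (Int × Int × Int × String × String) × Option Int × Int) x =>
      -- if verse_n != cur_verse: cur_verse = verse_n; last_end = -1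
      let st1 := if st.2.1 ≠ some x.1 then (st.1, some x.1, (-1 : Int)) else st
      -- if start >= last_end: result.append(…); last_end = end
      if st1.2.2 ≤ x.2.1 then (st1.1 ++ [x], st1.2.1, x.2.2.1) else st1)
    ([], none, -1)).1

-- ===== PRECONDITION & SPEC =====
def Spec_dedupe_overlapping_py (entities : List (Int × Int × Int × String × String)) (out : List (Int × Int × Int × String × String)) : Prop := out = dedupe_overlapping_py_alt entities
instance (entities : List (Int × Int × Int × String × String)) (out : List (Int × Int × Int × String × String)) : Decidable (Spec_dedupe_overlapping_py entities out) := by unfold Spec_dedupe_overlapping_py; infer_instance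

-- ===== CLAIM (what is proved, stated in full; the proofs are below) =====
def Claim_equal_dedupe_overlapping_py : Prop := ∀ (entities : List (Int × Int × Int × String × String)), Dom_dedupe_overlapping_py entities → Spec_dedupe_overlapping_py entities (dedupe_overlapping_py entities)

-- ===== LEMMAS AND PROOFS =====

abbrev pvEnt : Type := Int × Int × Int × String × String

def pvLt2 (a b : pvEnt) : Bool := decide (a.1 < b.1) || (!decide (b.1 < a.1) && decide (a.2.1 < b.2.1))

def pvLtS (a b : pvEnt) : Bool := decide (a.2.1 < b.2.1)

def pvBlk (e : List pvEnt) (v : Int) : List pvEnt :=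
  PySem.List.sorted (e.filter (fun x => x.1 == v)) (fun x => x.2.1) false

def pvVs (e : List pvEnt) : List Int :=
  PySem.List.sorted (PySem.Set.ofList (e.map (fun x => x.1))) (fun k => k) false

def pvGStep (acc : List pvEnt × Int) (x : pvEnt) : List pvEnt × Int :=
  if acc.2 ≤ x.2.1 then (acc.1 ++ [x], x.2.2.1) else acc

def pvBStep (st : List pvEnt × Option Int × Int) (x : pvEnt) : List pvEnt × Option Int × Int :=
  let st1 := if st.2.1 ≠ some x.1 then (st.1, some x.1, (-1 : Int)) else st
  if st1.2.2 ≤ x.2.1 then (st1.1 ++ [x], st1.2.1, x.2.2.1) else st1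

-- insertBy walks past a prefix it never inserts before
theorem pv_insertBy_skip {α : Type} (before : α → α → Bool) (x : α) (l1 l2 : List α)
    (h : ∀ y ∈ l1, before x y = false) :
    PySem.List.insertBy before x (l1 ++ l2) = l1 ++ PySem.List.insertBy before x l2 := by
  induction l1 with
  | nil => simp
  | cons y t ih =>
    have hy := h y (by simp)
    simp [PySem.List.insertBy, hy, ih (fun z hz => h z (by simp [hz]))]

-- insertBy lands before a suffix it is strictly before everywhere
theorem pv_insertBy_tail {α : Type} (before : α → α → Bool) (x : α) (l1 l2 : List α)
    (h : ∀ y ∈ l2, before x y = true) :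
    PySem.List.insertBy before x (l1 ++ l2) = PySem.List.insertBy before x l1 ++ l2 := by
  induction l1 with
  | nil =>
    cases l2 with
    | nil => simp
    | cons z t => simp [PySem.List.insertBy, h z (by simp)]
  | cons y t ih =>
    by_cases hy : before x y = true
    · simp [PySem.List.insertBy, hy]
    · simp only [Bool.not_eq_true] at hy
      simp [PySem.List.insertBy, hy, ih]

theorem pv_insertBy_congr {α : Type} (before before' : α → α → Bool) (x : α) (l : List α)
    (h : ∀ y ∈ l, before x y = before' x y) :
    PySem.List.insertBy before x l = PySem.List.insertBy before' x l := by
  induction l with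
  | nil => rfl
  | cons y t ih =>
    have hy := h y (by simp)
    by_cases hx : before x y = true
    · simp [PySem.List.insertBy, hx, hy ▸ hx]
    · simp only [Bool.not_eq_true] at hx
      simp [PySem.List.insertBy, hx, hy ▸ hx, ih (fun z hz => h z (by simp [hz]))]

theorem pv_sorted_append_singleton {α κ : Type} [LT κ] [DecidableLT κ] (l : List α) (x : α) (key : α → κ) :
    PySem.List.sorted (l ++ [x]) key false
      = PySem.List.insertBy (fun a b => decide (key a < key b)) x (PySem.List.sorted l key false) := by
  rw [PySem.List.sorted_eq_foldl_insertBy, PySem.List.sorted_eq_foldl_insertBy, List.foldl_append]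
  simp

theorem pv_sorted2_eq (e : List pvEnt) :
    PySem.List.sorted2 e (fun x => x.1) (fun x => x.2.1) false
      = e.foldl (fun acc x => PySem.List.insertBy pvLt2 x acc) [] := rfl

theorem pv_insertBy_map {α β : Type} (f : α → β) (before : β → β → Bool) (before' : α → α → Bool)
    (h : ∀ a b, before (f a) (f b) = before' a b) (x : α) (l : List α) :
    PySem.List.insertBy before (f x) (l.map f) = (PySem.List.insertBy before' x l).map f := by
  induction l with
  | nil => simp [PySem.List.insertBy]
  | cons y t ih =>
    by_cases hx : before' x y = true
    · simp [PySem.List.insertBy, h x y, hx]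
    · simp only [Bool.not_eq_true] at hx
      simp [PySem.List.insertBy, h x y, hx, ih]

theorem pv_sorted_map {α β κ : Type} [LT κ] [DecidableLT κ] (f : α → β) (key : β → κ) (l : List α) :
    PySem.List.sorted (l.map f) key false
      = (PySem.List.sorted l (fun x => key (f x)) false).map f := by
  induction l using List.reverseRecOn with
  | nil => rfl
  | append_singleton t x ih =>
    rw [List.map_append, List.map_singleton, pv_sorted_append_singleton,
      pv_sorted_append_singleton, ih, pv_insertBy_map (f := f)
        (before' := fun a b => decide (key (f a) < key (f b)))]
    intro a b; rfl

-- inserting one element into a flatten of verse blocks = inserting into its own block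
theorem pv_insert_flat (x : pvEnt) (Bf : Int → List pvEnt) : ∀ (vs : List Int),
    vs.Pairwise (· < ·) →
    (∀ v ∈ vs, ∀ y ∈ Bf v, y.1 = v) →
    (∀ v ∈ vs, Bf v ≠ []) →
    (x.1 ∉ vs → Bf x.1 = []) →
    PySem.List.insertBy pvLt2 x (vs.flatMap Bf)
      = (if x.1 ∈ vs then vs else PySem.List.insertBy (fun a b => decide (a < b)) x.1 vs).flatMap
          (fun v => if v = x.1 then PySem.List.insertBy pvLtS x (Bf v) else Bf v) := by
  intro vs
  induction vs with
  | nil =>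
    intro _ _ _ hout
    simp [PySem.List.insertBy, hout (by simp)]
  | cons w ws ih =>
    intro hp hels hne hout
    have hpw : ∀ v ∈ ws, w < v := fun v hv => (List.pairwise_cons.mp hp).1 v hv
    have hp' := (List.pairwise_cons.mp hp).2
    rcases lt_trichotomy w x.1 with hlt | heq | hgt
    · -- w < x.1 : skip block w
      have hskip : ∀ y ∈ Bf w, pvLt2 x y = false := by
        intro y hy
        have hy1 : y.1 = w := hels w (by simp) y hy
        simp [pvLt2, hy1]; omega
      have hmem : x.1 ∈ w :: ws ↔ x.1 ∈ ws := by
        constructor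
        · intro h; rcases List.mem_cons.mp h with h | h
          · omega
          · exact h
        · intro h; exact List.mem_cons_of_mem _ h
      rw [List.flatMap_cons, pv_insertBy_skip _ _ _ _ hskip,
        ih hp' (fun v hv => hels v (by simp [hv])) (fun v hv => hne v (by simp [hv]))
          (fun h => hout (fun hc => h (hmem.mp hc)))]
      have hwx : w ≠ x.1 := by omega
      by_cases hin : x.1 ∈ ws
      · rw [if_pos hin, if_pos (hmem.mpr hin), List.flatMap_cons]
        simp [hwx]
      · have hnin : x.1 ∉ w :: ws := fun hc => hin (hmem.mp hc)
        rw [if_neg hin, if_neg hnin]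
        have hins : PySem.List.insertBy (fun a b => decide (a < b)) x.1 (w :: ws)
            = w :: PySem.List.insertBy (fun a b => decide (a < b)) x.1 ws := by
          simp only [PySem.List.insertBy]
          rw [if_neg (by simp; omega)]
        rw [hins, List.flatMap_cons]
        simp [hwx]
    · -- w = x.1 : insert inside block w
      have htail : ∀ y ∈ ws.flatMap Bf, pvLt2 x y = true := by
        intro y hy
        obtain ⟨v, hv, hyv⟩ := List.mem_flatMap.mp hy
        have hy1 : y.1 = v := hels v (by simp [hv]) y hyv
        have : w < v := hpw v hv
        simp [pvLt2, hy1]; omega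
      have hblk : ∀ y ∈ Bf w, pvLt2 x y = pvLtS x y := by
        intro y hy
        have hy1 : y.1 = w := hels w (by simp) y hy
        simp [pvLt2, pvLtS, hy1, heq]
      have hin : x.1 ∈ w :: ws := by simp [← heq]
      have hxw : x.1 ∉ ws := by intro hc; have := hpw _ hc; omega
      have hws : ws.flatMap (fun v => if v = x.1 then PySem.List.insertBy pvLtS x (Bf v) else Bf v)
          = ws.flatMap Bf := by
        apply List.flatMap_congr
        intro v hv
        have : v ≠ x.1 := by intro hc; exact hxw (hc ▸ hv)
        simp [this]
      rw [List.flatMap_cons, pv_insertBy_tail _ _ _ _ htail, pv_insertBy_congr _ _ _ _ hblk,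
        if_pos hin, List.flatMap_cons, hws, if_pos heq, heq]
    · -- x.1 < w : x goes in front
      have hall : ∀ y ∈ (w :: ws).flatMap Bf, pvLt2 x y = true := by
        intro y hy
        obtain ⟨v, hv, hyv⟩ := List.mem_flatMap.mp hy
        have hy1 : y.1 = v := hels v hv y hyv
        have : w ≤ v := by
          rcases List.mem_cons.mp hv with h | h
          · omega
          · exact le_of_lt (hpw v h)
        simp [pvLt2, hy1]; omega
      have h0 : PySem.List.insertBy pvLt2 x ((w :: ws).flatMap Bf)
          = x :: (w :: ws).flatMap Bf := by
        have := pv_insertBy_tail pvLt2 x [] ((w :: ws).flatMap Bf) hall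
        simpa [PySem.List.insertBy] using this
      have hnin : x.1 ∉ w :: ws := by
        intro hc; rcases List.mem_cons.mp hc with h | h
        · omega
        · have := hpw _ h; omega
      have hins : PySem.List.insertBy (fun a b => decide (a < b)) x.1 (w :: ws)
          = x.1 :: w :: ws := by
        simp only [PySem.List.insertBy]
        rw [if_pos (by simp; omega)]
      have hrest : (w :: ws).flatMap
            (fun v => if v = x.1 then PySem.List.insertBy pvLtS x (Bf v) else Bf v)
          = (w :: ws).flatMap Bf := by
        apply List.flatMap_congr
        intro v hv
        have : v ≠ x.1 := by intro hc; exact hnin (hc ▸ hv)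
        simp [this]
      rw [h0, if_neg hnin, hins]
      conv_rhs => rw [List.flatMap_cons, if_pos rfl, hout hnin]
      rw [hrest]
      simp [PySem.List.insertBy]

theorem pv_blk_fst (e : List pvEnt) (v : Int) : ∀ y ∈ pvBlk e v, y.1 = v := by
  intro y hy
  rw [pvBlk, PySem.List.mem_sorted, List.mem_filter] at hy
  exact by simpa using hy.2

theorem pv_mem_vs (e : List pvEnt) (v : Int) : v ∈ pvVs e ↔ v ∈ e.map (fun x => x.1) := by
  rw [pvVs, PySem.List.mem_sorted, PySem.Set.mem_ofList]

theorem pv_vs_pairwise (e : List pvEnt) : (pvVs e).Pairwise (· < ·) :=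
  PySem.List.sorted_ofList_pairwise_lt _

theorem pv_blk_ne_nil (e : List pvEnt) (v : Int) (hv : v ∈ pvVs e) : pvBlk e v ≠ [] := by
  rw [pv_mem_vs] at hv
  obtain ⟨y, hy, hyv⟩ := List.mem_map.mp hv
  rw [pvBlk, Ne, PySem.List.sorted_eq_nil_iff]
  intro hc
  have : y ∈ e.filter (fun x => x.1 == v) := List.mem_filter.mpr ⟨hy, by simp [hyv]⟩
  rw [hc] at this
  exact List.not_mem_nil this

theorem pv_blk_nil_of_not_mem (e : List pvEnt) (v : Int) (hv : v ∉ pvVs e) : pvBlk e v = [] := by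
  rw [pv_mem_vs] at hv
  rw [pvBlk, PySem.List.sorted_eq_nil_iff, List.filter_eq_nil_iff]
  intro y hy
  simp only [beq_iff_eq]
  intro hc
  exact hv (List.mem_map.mpr ⟨y, hy, hc⟩)

theorem pv_blk_append (t : List pvEnt) (x : pvEnt) (v : Int) :
    pvBlk (t ++ [x]) v
      = if v = x.1 then PySem.List.insertBy pvLtS x (pvBlk t v) else pvBlk t v := by
  by_cases h : v = x.1
  · rw [if_pos h, pvBlk, List.filter_append, pvBlk]
    have : List.filter (fun y => y.1 == v) [x] = [x] := by simp [h]
    rw [this, pv_sorted_append_singleton]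
    rfl
  · rw [if_neg h, pvBlk, List.filter_append, pvBlk]
    have : List.filter (fun y => y.1 == v) [x] = [] := by
      simp only [beq_iff_eq, List.filter_cons, List.filter_nil]
      rw [if_neg (by exact fun hc => h hc.symm)]
    rw [this, List.append_nil]

theorem pv_vs_append (t : List pvEnt) (x : pvEnt) :
    pvVs (t ++ [x])
      = if x.1 ∈ pvVs t then pvVs t
        else PySem.List.insertBy (fun a b => decide (a < b)) x.1 (pvVs t) := by
  rw [pvVs, List.map_append, List.map_singleton, PySem.Set.ofList_append_singleton]
  by_cases h : x.1 ∈ pvVs t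
  · have hm : x.1 ∈ PySem.Set.ofList (t.map (fun y => y.1)) := by
      rw [PySem.Set.mem_ofList]; exact (pv_mem_vs t x.1).mp h
    rw [if_pos h, PySem.Set.add_of_mem hm, pvVs]
  · have hm : x.1 ∉ PySem.Set.ofList (t.map (fun y => y.1)) := by
      rw [PySem.Set.mem_ofList]; exact fun hc => h ((pv_mem_vs t x.1).mpr hc)
    rw [if_neg h, PySem.Set.add_of_not_mem hm, pv_sorted_append_singleton, pvVs]

theorem pv_sorted2_decomp (e : List pvEnt) :
    PySem.List.sorted2 e (fun x => x.1) (fun x => x.2.1) false = (pvVs e).flatMap (pvBlk e) := by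
  induction e using List.reverseRecOn with
  | nil => rfl
  | append_singleton t x ih =>
    rw [pv_sorted2_eq, List.foldl_append, ← pv_sorted2_eq, ih]
    simp only [List.foldl_cons, List.foldl_nil]
    rw [pv_insert_flat x (pvBlk t) (pvVs t) (pv_vs_pairwise t) (fun v _ => pv_blk_fst t v)
      (fun v hv => pv_blk_ne_nil t v hv) (fun h => pv_blk_nil_of_not_mem t x.1 h),
      pv_vs_append]
    apply List.flatMap_congr
    intro v _
    rw [pv_blk_append]

-- within one verse block the flat step never resets, so it is the greedy step
theorem pv_block_fold (w : Int) : ∀ (l : List pvEnt), (∀ x ∈ l, x.1 = w) →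
    ∀ (res : List pvEnt) (le : Int),
    l.foldl pvBStep (res, some w, le)
      = ((l.foldl pvGStep (res, le)).1, some w, (l.foldl pvGStep (res, le)).2) := by
  intro l
  induction l with
  | nil => intro _ res le; rfl
  | cons x t ih =>
    intro h res le
    have hx : x.1 = w := h x (by simp)
    have hstep : pvBStep (res, some w, le) x
        = ((pvGStep (res, le) x).1, some w, (pvGStep (res, le) x).2) := by
      simp only [pvBStep, pvGStep, hx]
      by_cases hc : le ≤ x.2.1 <;> simp [hc]
    simp only [List.foldl_cons, hstep]
    have hg := ih (fun y hy => h y (by simp [hy])) (pvGStep (res, le) x).1 (pvGStep (res, le) x).2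
    simpa using hg

theorem pv_flat_nested (Bf : Int → List pvEnt) : ∀ (vs : List Int),
    vs.Pairwise (· < ·) →
    (∀ v ∈ vs, ∀ y ∈ Bf v, y.1 = v) →
    (∀ v ∈ vs, Bf v ≠ []) →
    ∀ (res : List pvEnt) (cv : Option Int) (le : Int), (∀ v ∈ vs, cv ≠ some v) →
    ((vs.flatMap Bf).foldl pvBStep (res, cv, le)).1
      = vs.foldl (fun r v => ((Bf v).foldl pvGStep (r, (-1 : Int))).1) res := by
  intro vs
  induction vs with
  | nil => intro _ _ _ res cv le _; rfl
  | cons w ws ih =>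
    intro hp hels hne res cv le hcv
    have hpw : ∀ v ∈ ws, w < v := fun v hv => (List.pairwise_cons.mp hp).1 v hv
    obtain ⟨b, bt, hb⟩ := List.exists_cons_of_ne_nil (hne w (by simp))
    have hbw : b.1 = w := hels w (by simp) b (by simp [hb])
    have hfirst : pvBStep (res, cv, le) b = pvBStep (res, some w, (-1 : Int)) b := by
      have h1 : cv ≠ some b.1 := by rw [hbw]; exact hcv w (by simp)
      have h2 : cv ≠ some w := hbw ▸ h1
      simp only [pvBStep, hbw]
      simp [h2]
    have hblock : (Bf w).foldl pvBStep (res, cv, le)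
        = (((Bf w).foldl pvGStep (res, (-1 : Int))).1, some w,
           ((Bf w).foldl pvGStep (res, (-1 : Int))).2) := by
      rw [hb]
      simp only [List.foldl_cons, hfirst]
      have hstep : pvBStep (res, some w, (-1 : Int)) b
          = ((pvGStep (res, (-1 : Int)) b).1, some w, (pvGStep (res, (-1 : Int)) b).2) := by
        simp only [pvBStep, pvGStep, hbw]
        by_cases hc : (-1 : Int) ≤ b.2.1 <;> simp [hc]
      rw [hstep]
      have := pv_block_fold w bt (fun y hy => hels w (by simp) y (by simp [hb, hy]))
        (pvGStep (res, (-1 : Int)) b).1 (pvGStep (res, (-1 : Int)) b).2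
      simpa using this
    rw [List.flatMap_cons, List.foldl_append, hblock, List.foldl_cons]
    exact ih (List.pairwise_cons.mp hp).2 (fun v hv => hels v (by simp [hv]))
      (fun v hv => hne v (by simp [hv])) _ (some w) _
      (fun v hv hc => by have := hpw v hv; simp at hc; omega)

theorem pv_A_nested (e : List pvEnt) :
    dedupe_overlapping_py e
      = (pvVs e).foldl (fun r v => ((pvBlk e v).foldl pvGStep (r, (-1 : Int))).1) [] := by
  have hkeys : (e.foldl (fun d p => d.modify p.1 [] (· ++ [p.2]))
      (PySem.Dict.empty : PySem.Dict Int (List (Int × Int × String × String)))).keys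
      = PySem.Set.ofList (e.map fun x => x.1) := by
    rw [PySem.Dict.keys_foldl_modify_key e (fun p => p.1) [] (fun _ p => (· ++ [p.2]))
      PySem.Dict.empty]
    simp [PySem.Set.update_nil_left]
  have hgetD : ∀ v : Int, (e.foldl (fun d p => d.modify p.1 [] (· ++ [p.2]))
      (PySem.Dict.empty : PySem.Dict Int (List (Int × Int × String × String)))).getD v []
      = (e.filter (fun p => p.1 == v)).map (fun p => p.2) := by
    intro v
    rw [PySem.Dict.getD_foldl_modify_append e PySem.Dict.empty v]
    simp
  simp only [dedupe_overlapping_py]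
  rw [hkeys]
  rw [show PySem.List.sorted (PySem.Set.ofList (e.map fun x => x.1)) (fun k => k) false
    = pvVs e from rfl]
  apply PySem.List.foldl_congr_mem
  intro acc v hv
  rw [hgetD v]
  rw [show (e.filter (fun p => p.1 == v)) = (e.filter (fun x => x.1 == v)) from rfl,
    pv_sorted_map (fun p => p.2) (fun y => y.1) (e.filter (fun x => x.1 == v))]
  rw [show PySem.List.sorted (e.filter (fun x => x.1 == v)) (fun x => x.2.1) false
    = pvBlk e v from rfl]
  rw [List.foldl_map]
  congr 1
  apply PySem.List.foldl_congr_mem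
  intro acc' x hx
  have hx1 : x.1 = v := pv_blk_fst e v x hx
  simp only [pvGStep, ← hx1]

theorem pv_B_flat (e : List pvEnt) :
    dedupe_overlapping_py_alt e
      = (((pvVs e).flatMap (pvBlk e)).foldl pvBStep ([], none, (-1 : Int))).1 := by
  rw [dedupe_overlapping_py_alt, pv_sorted2_decomp]
  rfl

theorem pv_main (e : List pvEnt) : dedupe_overlapping_py e = dedupe_overlapping_py_alt e := by
  rw [pv_A_nested, pv_B_flat]
  exact (pv_flat_nested (pvBlk e) (pvVs e) (pv_vs_pairwise e) (fun v _ => pv_blk_fst e v)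
    (fun v hv => pv_blk_ne_nil e v hv) [] none (-1) (fun v _ => by simp)).symm

-- ===== VERDICT (by name: the statement is the Claim_ definition above) =====
theorem dedupe_overlapping_py_spec : Claim_equal_dedupe_overlapping_py := by
  intro e _
  unfold Spec_dedupe_overlapping_py
  exact pv_main e
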